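-- pv_equiv track=rewrite | github.com/bantmen/advent-of-code | 2023/day9.py | create_all_seqs
-- ===== SOURCE A (Python) =====
-- def create_seq(nums):
--     new_seq = []
--     is_all_zero = True
--     for i in range(1, len(nums)):
--         new = nums[i] - nums[i - 1]
--         is_all_zero &= new == 0
--         new_seq.append(new)
--     return new_seq, is_all_zero
--
-- def create_all_seqs(nums):
--     ret = [nums]
--     all_zero = False
--     while not all_zero:
--         nums, all_zero = create_seq(nums)
--         ret.append(nums)
--     prev_nums = None
--     for nums in reversed(ret):
--         if prev_nums is None:
--             nums.append(0) # Part 1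
--             nums.insert(0, 0) # Part 2
--         else:
--             nums.append(nums[-1] + prev_nums[-1]) # Part 1
--             nums.insert(0, nums[0] - prev_nums[0]) # Part 2
--         prev_nums = nums
--     return ret
-- ===== SOURCE B (Python) =====
-- def create_all_seqs(nums):
--     # recursive build of the difference triangle, then one bottom-up pass
--     # carrying running right/left extrapolation values (mutates rows in place,
--     # first row is the original input object, as in A)
--     def diffs(row):
--         return [b - a for a, b in zip(row, row[1:])]
--
--     def build(row):
--         if all(v == 0 for v in row):
--             return [row]
--         return [row] + build(diffs(row))
--
--     table = [nums] + build(diffs(nums))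
--     r = l = 0
--     first = True
--     for row in reversed(table):
--         if first:
--             first = False
--         else:
--             r = row[-1] + r
--             l = row[0] - l
--         row.append(r)
--         row.insert(0, l)
--     return table
-- ===== Notes on version B (the rewrite author's own statement) =====
-- stated objective: simpler
-- what changed: B builds the difference triangle with a recursive helper (stop when the row is all zero) instead of A's while-loop with an in-loop zero flag, and replaces A's prev-row-indexing extrapolation by one bottom-up pass carrying running right/left extrapolation values.
-- outside the precondition, e.g. on create_all_seqs([]): A raises IndexError, B raises IndexError
import Mathlib
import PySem

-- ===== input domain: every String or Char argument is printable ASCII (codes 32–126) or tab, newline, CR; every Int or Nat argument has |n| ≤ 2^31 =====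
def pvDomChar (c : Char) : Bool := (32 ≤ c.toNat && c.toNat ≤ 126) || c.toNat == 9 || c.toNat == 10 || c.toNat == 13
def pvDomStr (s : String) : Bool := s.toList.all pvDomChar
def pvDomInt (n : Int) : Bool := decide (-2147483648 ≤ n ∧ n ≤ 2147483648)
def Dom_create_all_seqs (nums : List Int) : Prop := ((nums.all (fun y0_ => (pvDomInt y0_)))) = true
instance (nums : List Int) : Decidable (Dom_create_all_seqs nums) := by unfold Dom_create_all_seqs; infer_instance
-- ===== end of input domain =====

-- B replaces A's while-loop-plus-flag triangle builder by a recursive builder and the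
-- two in-place extrapolations by one bottom-up pass carrying running left/right values
-- (objective: simpler). Both A and B mutate the input list in place in Python; the
-- equivalence proved here is about the return value.

-- ===== PORT A =====
-- create_seq: pyGetD is exact here: the loop indices i, i-1 lie in range(0, len(nums)).
def create_seq (nums : List Int) : List Int × Bool :=
  (PySem.List.pyRange 1 (nums.length : Int) 1).foldl
    (fun st i =>
      let new := PySem.List.pyGetD nums i 0 - PySem.List.pyGetD nums (i - 1) 0
      (st.1 ++ [new], st.2 && decide (new = 0)))
    ([], true)

-- loop-shape lemma for create_seq's fold (cited by the termination proof of buildA)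
lemma pvFoldlShape (g : Int → Int) (l : List Int) (acc : List Int) (b : Bool) :
    l.foldl (fun st i => (st.1 ++ [g i], st.2 && decide (g i = 0))) (acc, b)
      = (acc ++ l.map g, b && (l.map g).all (fun v => decide (v = 0))) := by
  induction l generalizing acc b with
  | nil => simp
  | cons x xs ih => simp [ih, Bool.and_assoc]

lemma create_seq_eq' (nums : List Int) :
    create_seq nums
      = ((PySem.List.pyRange 1 (nums.length : Int) 1).map
           (fun i => PySem.List.pyGetD nums i 0 - PySem.List.pyGetD nums (i - 1) 0),
         ((PySem.List.pyRange 1 (nums.length : Int) 1).map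
           (fun i => PySem.List.pyGetD nums i 0 - PySem.List.pyGetD nums (i - 1) 0)).all
           (fun v => decide (v = 0))) := by
  unfold create_seq
  rw [pvFoldlShape (fun i => PySem.List.pyGetD nums i 0 - PySem.List.pyGetD nums (i - 1) 0)]
  simp

-- A's while-loop: each iteration replaces nums by its difference row and appends it,
-- stopping once the appended row is all zero (the loop always runs at least once).
lemma create_seq_len (nums : List Int) :
    (create_seq nums).1.length = ((nums.length : Int) - 1).toNat := by
  rw [create_seq_eq']
  simp [PySem.List.length_pyRange_one]

lemma create_seq_false_len (nums : List Int) (h : (create_seq nums).2 = false) :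
    (create_seq nums).1.length < nums.length := by
  have hl := create_seq_len nums
  rcases Nat.eq_zero_or_pos nums.length with h0 | h0
  · exfalso
    rw [create_seq_eq'] at h
    rw [List.length_eq_zero_iff] at h0
    simp [h0, PySem.List.pyRange_one_eq_nil] at h
  · omega

def buildA (nums : List Int) : List (List Int) :=
  let r := create_seq nums
  if r.2 then [r.1]
  else r.1 :: buildA r.1
termination_by nums.length
decreasing_by
  rename_i h
  simp only [Bool.not_eq_true] at h
  exact create_seq_false_len nums h

-- the in-place extrapolation loop over reversed(ret); pyGetD is exact on Pre_
-- (nums ≠ [] makes every row it indexes nonempty).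
def extrapStepA (st : List (List Int) × Option (List Int)) (row : List Int) :
    List (List Int) × Option (List Int) :=
  match st.2 with
  | none =>
      let nr := 0 :: (row ++ [0])
      (st.1 ++ [nr], some nr)
  | some p =>
      let t := row ++ [PySem.List.pyGetD row (-1) 0 + PySem.List.pyGetD p (-1) 0]
      let nr := (PySem.List.pyGetD t 0 0 - PySem.List.pyGetD p 0 0) :: t
      (st.1 ++ [nr], some nr)

def create_all_seqs (nums : List Int) : List (List Int) :=
  let ret := nums :: buildA nums
  ((ret.reverse.foldl extrapStepA ([], none)).1).reverse

-- ===== PORT B =====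
def diffsB (row : List Int) : List Int :=
  (row.zip row.tail).map (fun p => p.2 - p.1)

lemma diffsB_len (row : List Int) : (diffsB row).length = row.length - 1 := by
  simp [diffsB]

def buildB (row : List Int) : List (List Int) :=
  if row.all (fun v => decide (v = 0)) then [row]
  else row :: buildB (diffsB row)
termination_by row.length
decreasing_by
  have hne : row ≠ [] := by rintro rfl; simp_all
  have hl := diffsB_len row
  have hp : 0 < row.length := List.length_pos_iff.mpr hne
  omega

def extrapStepB (st : List (List Int) × Int × Int × Bool) (row : List Int) :
    List (List Int) × Int × Int × Bool :=
  match st with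
  | (acc, r, l, first) =>
    if first then ((0 :: (row ++ [0])) :: acc, r, l, false)
    else
      let r' := PySem.List.pyGetD row (-1) 0 + r
      let l' := PySem.List.pyGetD row 0 0 - l
      ((l' :: (row ++ [r'])) :: acc, r', l', false)

def create_all_seqs_alt (nums : List Int) : List (List Int) :=
  let table := nums :: buildB (diffsB nums)
  (table.reverse.foldl extrapStepB ([], 0, 0, true)).1

-- ===== PRECONDITION & SPEC =====
-- Pre_ excludes only the empty list, on which Python A raises IndexError.
def Pre_create_all_seqs (nums : List Int) : Prop := nums ≠ []
instance (nums : List Int) : Decidable (Pre_create_all_seqs nums) := by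
  unfold Pre_create_all_seqs; infer_instance
def pvWitness_create_all_seqs : List Int := [1, 3, 6]

def Spec_create_all_seqs (nums : List Int) (out : List (List Int)) : Prop := out = create_all_seqs_alt nums
instance (nums : List Int) (out : List (List Int)) : Decidable (Spec_create_all_seqs nums out) := by unfold Spec_create_all_seqs; infer_instance

-- ===== CLAIM (what is proved, stated in full; the proofs are below) =====
def Claim_equal_create_all_seqs : Prop := ∀ (nums : List Int), Dom_create_all_seqs nums → Pre_create_all_seqs nums → Spec_create_all_seqs nums (create_all_seqs nums)

-- ===== LEMMAS AND PROOFS =====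

lemma map_range_eq_diffsB (nums : List Int) :
    (PySem.List.pyRange 1 (nums.length : Int) 1).map
      (fun i => PySem.List.pyGetD nums i 0 - PySem.List.pyGetD nums (i - 1) 0)
      = diffsB nums := by
  apply List.ext_getElem
  · simp [PySem.List.length_pyRange_one, diffsB_len]
  · intro k h1 h2
    simp only [List.getElem_map, PySem.List.getElem_pyRange_one]
    have hk : k + 1 < nums.length := by
      simp [PySem.List.length_pyRange_one] at h1; omega
    have e1 : (1 : Int) + (k : Int) = ((k + 1 : Nat) : Int) := by push_cast; ring
    have e2 : ((k + 1 : Nat) : Int) - 1 = ((k : Nat) : Int) := by push_cast; ring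
    rw [e1, e2, PySem.List.pyGetD_natCast, PySem.List.pyGetD_natCast]
    simp [diffsB, List.getD_eq_getElem?_getD, List.getElem?_eq_getElem hk,
      List.getElem?_eq_getElem (by omega : k < nums.length), List.getElem_tail]

lemma create_seq_eq (nums : List Int) :
    create_seq nums = (diffsB nums, (diffsB nums).all (fun v => decide (v = 0))) := by
  rw [create_seq_eq', map_range_eq_diffsB]

lemma build_eq : ∀ (n : Nat) (nums : List Int), nums.length ≤ n →
    buildA nums = buildB (diffsB nums) := by
  intro n
  induction n with
  | zero =>
    intro nums h
    have : nums = [] := List.length_eq_zero_iff.mp (Nat.le_zero.mp h)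
    subst this
    rw [buildA, buildB]
    simp [create_seq_eq, diffsB]
  | succ n ih =>
    intro nums h
    rw [buildA, buildB]
    simp only [create_seq_eq]
    by_cases hz : (diffsB nums).all (fun v => decide (v = 0)) = true
    · simp [hz]
    · simp only [hz, if_false, Bool.false_eq_true]
      have hne : nums ≠ [] := by rintro rfl; simp [diffsB] at hz
      have hl := diffsB_len nums
      have hp := List.length_pos_iff.mpr hne
      rw [ih (diffsB nums) (by omega)]

lemma buildB_ne_nil (row : List Int) : buildB row ≠ [] := by
  rw [buildB]
  split <;> simp

lemma buildB_dropLast_ne_nil : ∀ (n : Nat) (s : List Int), s.length ≤ n →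
    ∀ row ∈ (buildB s).dropLast, row ≠ [] := by
  intro n
  induction n with
  | zero =>
    intro s h
    have : s = [] := List.length_eq_zero_iff.mp (Nat.le_zero.mp h)
    subst this
    rw [buildB]; simp
  | succ n ih =>
    intro s h
    rw [buildB]
    by_cases hz : s.all (fun v => decide (v = 0)) = true
    · simp [hz]
    · simp only [hz, if_false, Bool.false_eq_true]
      rw [List.dropLast_cons_of_ne_nil (buildB_ne_nil _)]
      intro row hrow
      rcases List.mem_cons.mp hrow with rfl | hrow
      · rintro rfl; simp at hz
      · have hne : s ≠ [] := by rintro rfl; simp at hz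
        have hl := diffsB_len s
        have hp := List.length_pos_iff.mpr hne
        exact ih (diffsB s) (by omega) row hrow

lemma getLast_cons_append (x : Int) (xs : List Int) (v : Int) :
    PySem.List.pyGetD (x :: (xs ++ [v])) (-1) 0 = v := by
  rw [show (x :: (xs ++ [v])) = ((x :: xs) ++ [v]) by simp,
    PySem.List.pyGetD_neg_one_append_singleton]

lemma getLast_cons_cons_append (x a : Int) (xs : List Int) (v : Int) :
    PySem.List.pyGetD (x :: a :: (xs ++ [v])) (-1) 0 = v := by
  rw [show (x :: a :: (xs ++ [v])) = ((x :: a :: xs) ++ [v]) by simp,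
    PySem.List.pyGetD_neg_one_append_singleton]

lemma extrap_eq : ∀ (rows : List (List Int)) (accA accB : List (List Int)) (p : List Int)
    (r l : Int), (∀ row ∈ rows, row ≠ []) →
    PySem.List.pyGetD p (-1) 0 = r → PySem.List.pyGetD p 0 0 = l →
    accA = accB.reverse →
    (rows.foldl extrapStepA (accA, some p)).1
      = ((rows.foldl extrapStepB (accB, r, l, false)).1).reverse := by
  intro rows
  induction rows with
  | nil => intro accA accB p r l _ _ _ hacc; simpa using hacc
  | cons row rest ih =>
    intro accA accB p r l hne hr hl hacc
    obtain ⟨a, row', rfl⟩ := List.exists_cons_of_ne_nil (hne row (List.mem_cons_self))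
    simp only [List.foldl_cons, extrapStepA, extrapStepB, hr, hl, if_false,
      Bool.false_eq_true, List.cons_append, PySem.List.pyGetD_zero_cons]
    apply ih
    · intro q hq; exact hne q (List.mem_cons_of_mem _ hq)
    · exact getLast_cons_cons_append _ _ _ _
    · exact PySem.List.pyGetD_zero_cons _ _ _
    · simp [hacc]

-- ===== VERDICT (by name: the statement is the Claim_ definition above) =====
theorem create_all_seqs_spec : Claim_equal_create_all_seqs := by
  intro nums _ hpre
  show create_all_seqs nums = create_all_seqs_alt nums
  simp only [create_all_seqs, create_all_seqs_alt]
  rw [build_eq nums.length nums le_rfl]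
  have hTne : buildB (diffsB nums) ≠ [] := buildB_ne_nil _
  obtain ⟨tl, T'', hT2⟩ := List.exists_cons_of_ne_nil
    (show (buildB (diffsB nums)).reverse ≠ [] by simpa using hTne)
  have hrev : (nums :: buildB (diffsB nums)).reverse = tl :: (T'' ++ [nums]) := by
    simp [hT2]
  rw [hrev]
  simp only [List.foldl_cons, extrapStepA, extrapStepB, if_true]
  rw [List.nil_append]
  rw [extrap_eq (T'' ++ [nums]) [0 :: (tl ++ [0])] [0 :: (tl ++ [0])] (0 :: (tl ++ [0])) 0 0]
  · simp
  · intro row hrow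
    rcases List.mem_append.mp hrow with hrow | hrow
    · have hmem : row ∈ (buildB (diffsB nums)).dropLast := by
        have : T'' = (buildB (diffsB nums)).reverse.tail := by rw [hT2]; rfl
        rw [this] at hrow
        rw [List.tail_reverse] at hrow
        exact List.mem_reverse.mp hrow
      exact buildB_dropLast_ne_nil (diffsB nums).length (diffsB nums) le_rfl row hmem
    · simp at hrow; subst hrow; exact hpre
  · exact getLast_cons_append _ _ _
  · rw [PySem.List.pyGetD_zero_cons]
  · simp
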